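-- pv_equiv track=rewrite | github.com/Syded74/pawmatch- | app.py | text_to_score
-- ===== SOURCE A (Python) =====
-- def text_to_score(text, trait=None):
--     """Convert natural language to 1-5 score with context awareness"""
--     text = text.lower()
--
--     # Context-aware inverted traits
--     inverted_traits = ['shedding level', 'coat grooming frequency']
--     is_inverted = trait and any(inv in trait.lower() for inv in inverted_traits)
--
--     # Very high (5)
--     if any(word in text for word in ['very', 'extremely', 'absolutely', 'must', 'essential', 'critical', 'tons', 'super', 'really important', 'very important', 'highest', 'maximum']):
--         return 5 if not is_inverted else 1
--
--     # High (4)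
--     if any(word in text for word in ['important', 'prefer', 'would like', 'care about', 'matters', 'significant', 'quite', 'fairly', 'pretty', 'good amount', 'alot', 'a lot']):
--         return 4 if not is_inverted else 2
--
--     # Medium (3)
--     if any(word in text for word in ['moderate', 'medium', 'average', 'okay', 'fine', 'acceptable', 'decent', 'enough', 'some', 'somewhat', 'abit', 'a bit']):
--         return 3
--
--     # Low (2)
--     if any(word in text for word in ['not very', 'not much', 'not really', 'minimal', 'little', 'slight', 'relaxed', 'laid back', 'calm', 'less', 'lower']):
--         return 2 if not is_inverted else 4
--
--     # Very low (1)
--     if any(word in text for word in ['not at all', 'never', 'none', 'zero', 'not important', "don't care", "doesn't matter", 'avoid', 'no']):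
--         return 1 if not is_inverted else 5
--
--     return 3
-- ===== SOURCE B (Python) =====
-- _INVERTED = ['shedding level', 'coat grooming frequency']
--
-- _W5 = ['very', 'extremely', 'absolutely', 'must', 'essential', 'critical', 'tons', 'super', 'really important', 'very important', 'highest', 'maximum']
-- _W4 = ['important', 'prefer', 'would like', 'care about', 'matters', 'significant', 'quite', 'fairly', 'pretty', 'good amount', 'alot', 'a lot']
-- _W3 = ['moderate', 'medium', 'average', 'okay', 'fine', 'acceptable', 'decent', 'enough', 'some', 'somewhat', 'abit', 'a bit']
-- _W2 = ['not very', 'not much', 'not really', 'minimal', 'little', 'slight', 'relaxed', 'laid back', 'calm', 'less', 'lower']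
-- _W1 = ['not at all', 'never', 'none', 'zero', 'not important', "don't care", "doesn't matter", 'avoid', 'no']
--
-- # Flat keyword -> score pairs; no tier priority needed: the maximum matched
-- # score is taken, which coincides with A's first-match-in-descending-order rule.
-- _KEYWORD_SCORES = (
--     [(w, 5) for w in _W5] + [(w, 4) for w in _W4] + [(w, 3) for w in _W3]
--     + [(w, 2) for w in _W2] + [(w, 1) for w in _W1]
-- )
--
--
-- def text_to_score(text, trait=None):
--     t = text.lower()
--     is_inverted = trait and any(inv in trait.lower() for inv in _INVERTED)
--     best = None
--     for kw, score in _KEYWORD_SCORES: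
--         if kw in t and (best is None or score > best):
--             best = score
--     if best is None:
--         best = 3
--     # uniform inversion: 6 - s (and 6 - 3 == 3, so the default needs no case)
--     return 6 - best if is_inverted else best
-- ===== Notes on version B (the rewrite author's own statement) =====
-- stated objective: alternative
-- what changed: Replaces A's prioritized five-branch early-return chain (each branch with its own hand-written inverted constant) by a single pass over one flat (keyword, score) list that tracks the maximum matched score, then applies the uniform closed-form inversion 6 - best; correctness relies on A's tier priority being exactly descending score and on 6 - 3 = 3 covering the default.
import Mathlib
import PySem

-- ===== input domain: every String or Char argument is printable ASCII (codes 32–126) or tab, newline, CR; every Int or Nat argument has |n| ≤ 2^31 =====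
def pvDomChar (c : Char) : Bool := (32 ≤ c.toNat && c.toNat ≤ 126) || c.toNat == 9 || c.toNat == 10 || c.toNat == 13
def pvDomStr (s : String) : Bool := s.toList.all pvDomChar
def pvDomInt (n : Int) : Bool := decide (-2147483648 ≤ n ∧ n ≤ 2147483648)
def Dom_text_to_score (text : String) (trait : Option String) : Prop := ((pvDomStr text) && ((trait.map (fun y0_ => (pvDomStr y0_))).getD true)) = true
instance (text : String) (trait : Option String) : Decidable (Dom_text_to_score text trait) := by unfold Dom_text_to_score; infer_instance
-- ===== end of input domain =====

-- B replaces A's prioritized tier chain (five early-return branches with per-branch inverted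
-- constants) by one flat pass over (keyword, score) pairs tracking the maximum matched score,
-- with a uniform 6 - best inversion (simpler decomposition; same cost).

-- ===== PORT A =====
-- `trait and any(...)`: falsy when trait is None or "", else the any(...); as a Bool:
def pvIsInverted (trait : Option String) : Bool :=
  match trait with
  | none => false
  | some tr => decide (tr ≠ "") && (["shedding level", "coat grooming frequency"].any (fun inv => PySem.Str.isIn inv (PySem.Str.lower tr)))

def text_to_score (text : String) (trait : Option String) : Int :=
  let t := PySem.Str.lower text
  let isInv := pvIsInverted trait
  if ["very", "extremely", "absolutely", "must", "essential", "critical", "tons", "super", "really important", "very important", "highest", "maximum"].any (fun w => PySem.Str.isIn w t) then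
    (if !isInv then 5 else 1)
  else if ["important", "prefer", "would like", "care about", "matters", "significant", "quite", "fairly", "pretty", "good amount", "alot", "a lot"].any (fun w => PySem.Str.isIn w t) then
    (if !isInv then 4 else 2)
  else if ["moderate", "medium", "average", "okay", "fine", "acceptable", "decent", "enough", "some", "somewhat", "abit", "a bit"].any (fun w => PySem.Str.isIn w t) then
    3
  else if ["not very", "not much", "not really", "minimal", "little", "slight", "relaxed", "laid back", "calm", "less", "lower"].any (fun w => PySem.Str.isIn w t) then
    (if !isInv then 2 else 4)
  else if ["not at all", "never", "none", "zero", "not important", "don't care", "doesn't matter", "avoid", "no"].any (fun w => PySem.Str.isIn w t) then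
    (if !isInv then 1 else 5)
  else 3

-- ===== PORT B =====
def pvW5 : List String := ["very", "extremely", "absolutely", "must", "essential", "critical", "tons", "super", "really important", "very important", "highest", "maximum"]
def pvW4 : List String := ["important", "prefer", "would like", "care about", "matters", "significant", "quite", "fairly", "pretty", "good amount", "alot", "a lot"]
def pvW3 : List String := ["moderate", "medium", "average", "okay", "fine", "acceptable", "decent", "enough", "some", "somewhat", "abit", "a bit"]
def pvW2 : List String := ["not very", "not much", "not really", "minimal", "little", "slight", "relaxed", "laid back", "calm", "less", "lower"]
def pvW1 : List String := ["not at all", "never", "none", "zero", "not important", "don't care", "doesn't matter", "avoid", "no"]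

-- Source B's _KEYWORD_SCORES: flat list of (keyword, score) pairs
def pvKeywordScores : List (String × Int) :=
  pvW5.map (fun w => (w, 5)) ++ pvW4.map (fun w => (w, 4)) ++ pvW3.map (fun w => (w, 3))
    ++ pvW2.map (fun w => (w, 2)) ++ pvW1.map (fun w => (w, 1))

-- the body of Source B's `for kw, score in _KEYWORD_SCORES:` loop
def pvStep (t : String) (best : Option Int) (p : String × Int) : Option Int :=
  if PySem.Str.isIn p.1 t && (match best with | none => true | some b => decide (b < p.2)) then
    some p.2
  else best

def text_to_score_alt (text : String) (trait : Option String) : Int :=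
  let t := PySem.Str.lower text
  let isInv := pvIsInverted trait
  let best := (pvKeywordScores.foldl (pvStep t) none).getD 3
  if isInv then 6 - best else best

-- ===== PRECONDITION & SPEC =====
def Spec_text_to_score (text : String) (trait : Option String) (out : Int) : Prop := out = text_to_score_alt text trait
instance (text : String) (trait : Option String) (out : Int) : Decidable (Spec_text_to_score text trait out) := by unfold Spec_text_to_score; infer_instance

-- ===== CLAIM (what is proved, stated in full; the proofs are below) =====
def Claim_equal_text_to_score : Prop := ∀ (text : String) (trait : Option String), Dom_text_to_score text trait → Spec_text_to_score text trait (text_to_score text trait)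

-- ===== LEMMAS AND PROOFS =====

-- running max, as the loop updates it
def pvOmax (o : Option Int) (s : Int) : Option Int :=
  match o with
  | none => some s
  | some b => some (max b s)

theorem pvOmax_idem (o : Option Int) (s : Int) : pvOmax (pvOmax o s) s = pvOmax o s := by
  cases o <;> simp [pvOmax]

theorem pvStep_pos (t : String) (o : Option Int) (kw : String) (s : Int)
    (h : PySem.Str.isIn kw t = true) : pvStep t o (kw, s) = pvOmax o s := by
  cases o with
  | none => unfold pvStep pvOmax; rw [h]; rfl
  | some b =>
    unfold pvStep pvOmax
    rw [h]
    simp only [Bool.true_and, decide_eq_true_eq]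
    by_cases hb : b < s
    · rw [if_pos hb, max_eq_right hb.le]
    · rw [if_neg hb, max_eq_left (not_lt.mp hb)]

theorem pvStep_neg (t : String) (o : Option Int) (kw : String) (s : Int)
    (h : PySem.Str.isIn kw t = false) : pvStep t o (kw, s) = o := by
  unfold pvStep; rw [h]; rfl

-- folding the loop body over one constant-score block = "update with s iff any keyword matched"
theorem foldl_step_block (t : String) (s : Int) (kws : List String) (o : Option Int) :
    (kws.map (fun w => (w, s))).foldl (pvStep t) o
      = if kws.any (fun w => PySem.Str.isIn w t) then pvOmax o s else o := by
  induction kws generalizing o with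
  | nil => rfl
  | cons kw rest ih =>
    rw [List.map_cons, List.foldl_cons]
    cases h : PySem.Str.isIn kw t with
    | true =>
      rw [pvStep_pos t o kw s h, ih]
      simp only [List.any_cons, h, Bool.true_or, reduceIte]
      by_cases hr : (rest.any fun w => PySem.Str.isIn w t) = true
      · rw [if_pos hr, pvOmax_idem]
      · rw [if_neg hr]
    | false =>
      rw [pvStep_neg t o kw s h, ih]
      simp only [List.any_cons, h, Bool.false_or]

-- ===== VERDICT (by name: the statement is the Claim_ definition above) =====
set_option maxHeartbeats 2000000 in
theorem text_to_score_spec : Claim_equal_text_to_score := by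
  intro text trait _
  unfold Spec_text_to_score
  simp only [text_to_score, text_to_score_alt, pvKeywordScores, pvW5, pvW4, pvW3, pvW2, pvW1,
    List.foldl_append, foldl_step_block]
  by_cases h5 : (["very", "extremely", "absolutely", "must", "essential", "critical", "tons", "super", "really important", "very important", "highest", "maximum"] : List String).any (fun w => PySem.Str.isIn w (PySem.Str.lower text)) = true <;>
  by_cases h4 : (["important", "prefer", "would like", "care about", "matters", "significant", "quite", "fairly", "pretty", "good amount", "alot", "a lot"] : List String).any (fun w => PySem.Str.isIn w (PySem.Str.lower text)) = true <;>
  by_cases h3 : (["moderate", "medium", "average", "okay", "fine", "acceptable", "decent", "enough", "some", "somewhat", "abit", "a bit"] : List String).any (fun w => PySem.Str.isIn w (PySem.Str.lower text)) = true <;>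
  by_cases h2 : (["not very", "not much", "not really", "minimal", "little", "slight", "relaxed", "laid back", "calm", "less", "lower"] : List String).any (fun w => PySem.Str.isIn w (PySem.Str.lower text)) = true <;>
  by_cases h1 : (["not at all", "never", "none", "zero", "not important", "don't care", "doesn't matter", "avoid", "no"] : List String).any (fun w => PySem.Str.isIn w (PySem.Str.lower text)) = true <;>
  cases hI : pvIsInverted trait <;>
    simp only [h5, h4, h3, h2, h1, Bool.not_true, Bool.not_false, pvOmax, Option.getD,
      if_true] <;>
    norm_num [pvOmax]
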